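-- pv_equiv track=rewrite | github.com/Pragna235/Starters101 | WARRIORCHEF.py | find_min_resistance
-- ===== SOURCE A (Python) =====
-- def can_defeat_all_enemies(N, H, strengths, X):
--     for strength in strengths:
--         if strength <= X:
--             continue
--         elif H > strength:
--             H -= strength
--         else:
--             return False
--     return True
--
-- def find_min_resistance(T, test_cases):
--     results = []
--     for i in range(T):
--         N, H, strengths = test_cases[i]
--         left, right = 0, max(strengths)  # Updated left to start from 0
--         while left <= right:  # Changed the condition to include equal to
--             mid = (left + right) // 2
--             if can_defeat_all_enemies(N, H, strengths, mid):
--                 right = mid - 1  # Updated right to mid - 1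
--             else:
--                 left = mid + 1
--         results.append(left)
--     return results
-- ===== SOURCE B (Python) =====
-- def survives(H, strengths, X):
--     for strength in strengths:
--         if strength <= X:
--             continue
--         elif H > strength:
--             H -= strength
--         else:
--             return False
--     return True
--
-- def find_min_resistance(T, test_cases):
--     results = []
--     for i in range(T):
--         N, H, strengths = test_cases[i]
--         candidates = sorted([0] + [s for s in strengths if s > 0])
--         for c in candidates:
--             if survives(H, strengths, c):
--                 results.append(c)
--                 break
--     return results
-- ===== Notes on version B (the rewrite author's own statement) =====
-- stated objective: alternative
-- what changed: Replaces A's binary search over [0, max(strengths)] with a linear scan of the sorted candidate thresholds {0} ∪ {s in strengths : s > 0} (the only points where survivability can change), returning the first candidate that survives the simulation.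
import Mathlib
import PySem

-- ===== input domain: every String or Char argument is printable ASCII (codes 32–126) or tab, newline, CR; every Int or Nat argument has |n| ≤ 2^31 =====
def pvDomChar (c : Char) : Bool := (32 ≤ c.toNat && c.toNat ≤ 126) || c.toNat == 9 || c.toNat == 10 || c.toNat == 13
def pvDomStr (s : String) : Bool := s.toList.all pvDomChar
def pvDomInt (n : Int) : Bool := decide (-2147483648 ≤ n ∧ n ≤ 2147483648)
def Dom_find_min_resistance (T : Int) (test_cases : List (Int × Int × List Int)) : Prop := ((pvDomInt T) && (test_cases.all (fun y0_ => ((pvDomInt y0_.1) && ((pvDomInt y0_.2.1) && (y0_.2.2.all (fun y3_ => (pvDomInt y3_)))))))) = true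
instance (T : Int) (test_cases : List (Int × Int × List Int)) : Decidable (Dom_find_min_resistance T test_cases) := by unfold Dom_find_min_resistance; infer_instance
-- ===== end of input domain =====

-- B replaces A's binary search over [0, max(strengths)] by a linear scan of the sorted
-- candidate thresholds {0} ∪ {s ∈ strengths | s > 0}, the only points where feasibility can change
-- (objective: alternative).

-- ===== PORT A =====
-- the 'for strength in strengths' loop of can_defeat_all_enemies, H as the running health
def canDefeatLoop (H : Int) (strengths : List Int) (X : Int) : Bool :=
  match strengths with
  | [] => true
  | s :: rest =>
    if s ≤ X then canDefeatLoop H rest X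
    else if H > s then canDefeatLoop (H - s) rest X
    else false

def can_defeat_all_enemies (_N : Int) (H : Int) (strengths : List Int) (X : Int) : Bool :=
  canDefeatLoop H strengths X

-- the 'while left <= right' loop
def bsearch (N : Int) (H : Int) (strengths : List Int) (left right : Int) : Int :=
  if _h : left ≤ right then
    let mid := PySem.Int.floordiv (left + right) 2
    if can_defeat_all_enemies N H strengths mid then bsearch N H strengths left (mid - 1)
    else bsearch N H strengths (mid + 1) right
  else left
termination_by (right + 1 - left).toNat
decreasing_by
  · have := PySem.Int.floordiv_two_mid_bounds _h; omega
  · have := PySem.Int.floordiv_two_mid_bounds _h; omega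

def find_min_resistance (T : Int) (test_cases : List (Int × Int × List Int)) : List Int :=
  (PySem.List.pyRange 0 T 1).foldl (fun results i =>
    let tc := PySem.List.pyGetD test_cases i (0, 0, [])
    -- max(strengths); .getD 0 is never used under Pre_ (strengths nonempty)
    let right := (PySem.List.max? tc.2.2 (fun x => x)).getD 0
    results ++ [bsearch tc.1 tc.2.1 tc.2.2 0 right]) []

-- ===== PORT B =====
-- B's helper 'survives' (same simulation loop as A's helper)
def survivesB (H : Int) (strengths : List Int) (X : Int) : Bool :=
  match strengths with
  | [] => true
  | s :: rest =>
    if s ≤ X then survivesB H rest X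
    else if H > s then survivesB (H - s) rest X
    else false

def find_min_resistance_alt (T : Int) (test_cases : List (Int × Int × List Int)) : List Int :=
  (PySem.List.pyRange 0 T 1).foldl (fun results i =>
    let tc := PySem.List.pyGetD test_cases i (0, 0, [])
    let candidates := PySem.List.sorted (0 :: tc.2.2.filter (fun s => decide (0 < s))) (fun x => x) false
    -- 'for c in candidates: if survives: append; break' = find? over candidates
    match candidates.find? (fun c => survivesB tc.2.1 tc.2.2 c) with
    | some c => results ++ [c]
    | none => results) []

-- ===== PRECONDITION & SPEC =====
-- Pre_ excludes exactly the inputs where A raises: T beyond len(test_cases) (IndexError)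
-- and an empty strength list among the first T cases (ValueError from max([])).
def Pre_find_min_resistance (T : Int) (test_cases : List (Int × Int × List Int)) : Prop :=
  T ≤ (test_cases.length : Int) ∧ ∀ tc ∈ test_cases.take T.toNat, tc.2.2 ≠ []
instance (T : Int) (test_cases : List (Int × Int × List Int)) : Decidable (Pre_find_min_resistance T test_cases) := by unfold Pre_find_min_resistance; infer_instance

def pvWitness_find_min_resistance : Int × (List (Int × Int × List Int)) := (2, [(3, 10, [2, 7, 4]), (1, 1, [5])])

def Spec_find_min_resistance (T : Int) (test_cases : List (Int × Int × List Int)) (out : List Int) : Prop := out = find_min_resistance_alt T test_cases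
instance (T : Int) (test_cases : List (Int × Int × List Int)) (out : List Int) : Decidable (Spec_find_min_resistance T test_cases out) := by unfold Spec_find_min_resistance; infer_instance

-- ===== CLAIM (what is proved, stated in full; the proofs are below) =====
def Claim_equal_find_min_resistance : Prop := ∀ (T : Int) (test_cases : List (Int × Int × List Int)), Dom_find_min_resistance T test_cases → Pre_find_min_resistance T test_cases → Spec_find_min_resistance T test_cases (find_min_resistance T test_cases)

-- ===== LEMMAS AND PROOFS =====

-- B's helper is the same simulation as A's
theorem survivesB_eq (H : Int) (ss : List Int) (X : Int) : survivesB H ss X = canDefeatLoop H ss X := by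
  induction ss generalizing H with
  | nil => rfl
  | cons s rest ih => simp [survivesB, canDefeatLoop, ih]

-- feasibility is monotone in threshold (for nonneg thresholds) and in health
theorem sim_mono (ss : List Int) : ∀ H H' X Y : Int, 0 ≤ X → X ≤ Y → H ≤ H' →
    canDefeatLoop H ss X = true → canDefeatLoop H' ss Y = true := by
  induction ss with
  | nil => intros; rfl
  | cons s rest ih =>
    intro H H' X Y hX hXY hH h
    simp only [canDefeatLoop] at h ⊢
    by_cases h1 : s ≤ X
    · rw [if_pos h1] at h
      rw [if_pos (le_trans h1 hXY)]
      exact ih H H' X Y hX hXY hH h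
    · rw [if_neg h1] at h
      by_cases h2 : s ≤ Y
      · rw [if_pos h2]
        split_ifs at h with h3
        exact ih (H - s) H' X Y hX hXY (by omega) h
      · rw [if_neg h2]
        split_ifs at h with h3
        rw [if_pos (by omega : H' > s)]
        exact ih (H - s) (H' - s) X Y hX hXY (by omega) h

-- the simulation only depends on which enemies are skipped
theorem sim_congr (ss : List Int) : ∀ H X Y : Int, (∀ s ∈ ss, (s ≤ X ↔ s ≤ Y)) →
    canDefeatLoop H ss X = canDefeatLoop H ss Y := by
  induction ss with
  | nil => intros; rfl
  | cons s rest ih =>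
    intro H X Y h
    have hs := h s (by simp)
    simp only [canDefeatLoop]
    by_cases h1 : s ≤ X
    · rw [if_pos h1, if_pos (hs.mp h1)]
      exact ih H X Y (fun t ht => h t (by simp [ht]))
    · rw [if_neg h1, if_neg (fun hy => h1 (hs.mpr hy))]
      split_ifs
      · exact ih (H - s) X Y (fun t ht => h t (by simp [ht]))
      · rfl

theorem sim_all_skip (ss : List Int) (H X : Int) (h : ∀ s ∈ ss, s ≤ X) :
    canDefeatLoop H ss X = true := by
  induction ss with
  | nil => rfl
  | cons s rest ih => simp [canDefeatLoop, h s (by simp)]; exact ih (fun t ht => h t (by simp [ht]))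

-- binary-search characterisation
theorem bsearch_spec_aux (N H : Int) (ss : List Int) : ∀ (fuel : Nat) (l r : Int), 0 ≤ l → l ≤ r + 1 →
    (r + 1 - l).toNat ≤ fuel →
    l ≤ bsearch N H ss l r ∧ bsearch N H ss l r ≤ r + 1 ∧
    (∀ x, l ≤ x → x < bsearch N H ss l r → canDefeatLoop H ss x = false) ∧
    (bsearch N H ss l r ≤ r → canDefeatLoop H ss (bsearch N H ss l r) = true) := by
  intro fuel
  induction fuel with
  | zero =>
    intro l r hl hlr1 hfuel
    have hlr : ¬ l ≤ r := by omega
    rw [bsearch, dif_neg hlr]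
    refine ⟨le_refl _, by omega, fun x hx1 hx2 => absurd hx2 (by omega), fun h => absurd h (by omega)⟩
  | succ n ih =>
    intro l r hl hlr1 hfuel
    by_cases hlr : l ≤ r
    · have hmid := PySem.Int.floordiv_two_mid_bounds hlr
      rw [bsearch, dif_pos hlr]
      simp only [can_defeat_all_enemies]
      set mid := PySem.Int.floordiv (l + r) 2 with hmiddef
      by_cases hp : canDefeatLoop H ss mid = true
      · rw [if_pos hp]
        obtain ⟨i1, i2, i3, i4⟩ := ih l (mid - 1) hl (by omega) (by omega)
        refine ⟨i1, by omega, i3, fun hle => ?_⟩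
        by_cases hm : bsearch N H ss l (mid - 1) ≤ mid - 1
        · exact i4 hm
        · have : bsearch N H ss l (mid - 1) = mid := by omega
          rw [this]; exact hp
      · rw [if_neg hp]
        obtain ⟨i1, i2, i3, i4⟩ := ih (mid + 1) r (by omega) (by omega) (by omega)
        refine ⟨by omega, i2, fun x hx1 hx2 => ?_, i4⟩
        by_cases hxm : mid + 1 ≤ x
        · exact i3 x hxm hx2
        · have hxmid : x ≤ mid := by omega
          cases hcx : canDefeatLoop H ss x
          · rfl
          · exact absurd (sim_mono ss H H x mid (by omega) hxmid le_rfl hcx) (by simpa using hp)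
    · rw [bsearch, dif_neg hlr]
      refine ⟨le_refl _, by omega, fun x hx1 hx2 => absurd hx2 (by omega), fun h => absurd h (by omega)⟩

theorem bsearch_spec (N H : Int) (ss : List Int) (l r : Int) (hl : 0 ≤ l) (hlr1 : l ≤ r + 1) :
    l ≤ bsearch N H ss l r ∧ bsearch N H ss l r ≤ r + 1 ∧
    (∀ x, l ≤ x → x < bsearch N H ss l r → canDefeatLoop H ss x = false) ∧
    (bsearch N H ss l r ≤ r → canDefeatLoop H ss (bsearch N H ss l r) = true) :=
  bsearch_spec_aux N H ss (r + 1 - l).toNat l r hl hlr1 le_rfl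

-- the first feasible candidate of a sorted nonneg candidate list containing the least feasible m
theorem find?_first (H : Int) (ss : List Int) (m : Int) (cs : List Int)
    (hsorted : cs.Pairwise (· ≤ ·)) (hnonneg : ∀ c ∈ cs, 0 ≤ c) (hmem : m ∈ cs)
    (hm : canDefeatLoop H ss m = true)
    (hleast : ∀ x, 0 ≤ x → x < m → canDefeatLoop H ss x = false) :
    cs.find? (fun c => canDefeatLoop H ss c) = some m := by
  induction cs with
  | nil => exact absurd hmem (by simp)
  | cons c rest ih =>
    rcases List.pairwise_cons.mp hsorted with ⟨hcle, hrest⟩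
    by_cases hc : canDefeatLoop H ss c = true
    · have hcm : c = m := by
        rcases List.mem_cons.mp hmem with h | h
        · omega
        · have h1 : c ≤ m := hcle m h
          have h2 : ¬ c < m := fun hlt => by
            have := hleast c (hnonneg c (by simp)) hlt
            rw [this] at hc; exact absurd hc (by simp)
          omega
      subst hcm
      rw [List.find?_cons_of_pos (by simp [hc])]
    · have hcm : c ≠ m := fun h => by rw [h] at hc; exact hc hm
      have hmem' : m ∈ rest := by
        rcases List.mem_cons.mp hmem with h | h
        · exact absurd h.symm hcm
        · exact h
      rw [List.find?_cons_of_neg (by simpa using hc)]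
      exact ih hrest (fun t ht => hnonneg t (by simp [ht])) hmem'

-- per-test-case equality: the binary search equals the first feasible sorted candidate
theorem bsearch_least (N H : Int) (ss : List Int) (M : Int) (hMmax : ∀ y ∈ ss, y ≤ M) :
    0 ≤ bsearch N H ss 0 M ∧ canDefeatLoop H ss (bsearch N H ss 0 M) = true ∧
    (∀ x, 0 ≤ x → x < bsearch N H ss 0 M → canDefeatLoop H ss x = false) := by
  by_cases hM : 0 ≤ M
  · obtain ⟨hm0, hmM, hmleast, hmfeas⟩ := bsearch_spec N H ss 0 M le_rfl (by omega)
    have hMfeas : canDefeatLoop H ss M = true := sim_all_skip ss H M hMmax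
    have hmle : bsearch N H ss 0 M ≤ M := by
      by_contra h
      have := hmleast M hM (by omega)
      rw [hMfeas] at this; exact absurd this (by simp)
    exact ⟨hm0, hmfeas hmle, hmleast⟩
  · rw [bsearch, dif_neg (by omega : ¬ (0 : Int) ≤ M)]
    refine ⟨le_refl _, sim_all_skip ss H 0 (fun s hs => le_trans (hMmax s hs) (by omega)),
      fun x hx1 hx2 => absurd hx2 (by omega)⟩

theorem case_eq (N H : Int) (ss : List Int) (hne : ss ≠ []) :
    (PySem.List.sorted (0 :: ss.filter (fun s => decide (0 < s))) (fun x => x) false).find?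
        (fun c => survivesB H ss c)
      = some (bsearch N H ss 0 ((PySem.List.max? ss (fun x => x)).getD 0)) := by
  obtain ⟨M, hM⟩ : ∃ M, PySem.List.max? ss (fun x => x) = some M := by
    cases h : PySem.List.max? ss (fun x => x)
    · exact absurd ((PySem.List.max?_eq_none_iff _ _).mp h) hne
    · exact ⟨_, rfl⟩
  have hMmax : ∀ y ∈ ss, y ≤ M := fun y hy => PySem.List.max?_isMax hM y hy
  rw [hM]
  simp only [Option.getD_some]
  set m := bsearch N H ss 0 M with hmdef
  obtain ⟨hm0, hfeas, hleast⟩ := bsearch_least N H ss M hMmax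
  set cs := PySem.List.sorted (0 :: ss.filter (fun s => decide (0 < s))) (fun x => x) false with e
  have hperm : cs.Perm (0 :: ss.filter (fun s => decide (0 < s))) := PySem.List.sorted_perm _ _ _
  have hmemiff : ∀ x, x ∈ cs ↔ x ∈ (0 :: ss.filter (fun s => decide (0 < s))) := fun x => hperm.mem_iff
  have hnonneg : ∀ c ∈ cs, 0 ≤ c := by
    intro c hc
    rcases List.mem_cons.mp ((hmemiff c).mp hc) with h | h
    · omega
    · have := List.of_mem_filter h; simp at this; omega
  have hsorted : cs.Pairwise (· ≤ ·) := PySem.List.sorted_pairwise _ _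
  have hmem : m ∈ cs := by
    rw [hmemiff]
    by_cases hm0' : m = 0
    · simp [hm0']
    · have hmpos : 0 < m := by omega
      have hinf : canDefeatLoop H ss (m - 1) = false := hleast (m - 1) (by omega) (by omega)
      have hnot : ¬ (∀ s ∈ ss, (s ≤ m - 1 ↔ s ≤ m)) := fun h => by
        rw [sim_congr ss H (m - 1) m h, hfeas] at hinf
        exact absurd hinf (by simp)
      push Not at hnot
      obtain ⟨s, hs, hsne⟩ := hnot
      have hsm : s = m := by
        by_cases h1 : s ≤ m - 1 <;> by_cases h2 : s ≤ m <;> simp [h1, h2] at hsne <;> omega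
      right
      exact List.mem_filter.mpr ⟨hsm ▸ hs, by simp; omega⟩
  have hfind := find?_first H ss m cs hsorted hnonneg hmem hfeas hleast
  have hfun : (fun c => survivesB H ss c) = (fun c => canDefeatLoop H ss c) :=
    funext (fun c => survivesB_eq H ss c)
  rw [hfun]
  exact hfind

-- ===== VERDICT (by name: the statement is the Claim_ definition above) =====
theorem find_min_resistance_spec : Claim_equal_find_min_resistance := by
  intro T tcs _ hpre
  obtain ⟨hT, hne⟩ := hpre
  unfold Spec_find_min_resistance find_min_resistance find_min_resistance_alt
  apply Eq.symm
  apply PySem.List.foldl_congr_mem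
  intro acc i hi
  have hi' := (PySem.List.mem_pyRange_one).mp hi
  have hidx : i.toNat < tcs.length := by omega
  have hget : PySem.List.pyGetD tcs i (0, 0, []) = tcs[i.toNat] :=
    PySem.List.pyGetD_eq_getElem tcs (0, 0, []) (by omega) (by omega)
  have hmemtake : tcs[i.toNat] ∈ tcs.take T.toNat := by
    apply List.mem_take_iff_getElem.mpr
    exact ⟨i.toNat, by omega, rfl⟩
  have hssne : (tcs[i.toNat]).2.2 ≠ [] := hne _ hmemtake
  simp only [hget]
  rw [case_eq _ _ _ hssne]
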